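-- pv_equiv track=rewrite | github.com/siddhu1997/GoogleFoobar | Challenge 3/Part 3/solution.py | count
-- ===== SOURCE A (Python) =====
-- cache = dict()
--
-- def count(height,bricks):
-- 	if bricks == 0:
-- 		return 1
-- 	elif bricks < height:
-- 		return 0
-- 	else:
-- 		key = "#"+str(height)+"#"+str(bricks)+"$"
-- 		if key not in cache:
-- 			temp = count(height+1,bricks-height)+count(height+1,bricks)
-- 			cache[key] = temp
-- 			return cache[key]
-- 		else:
-- 			 return cache[key]
-- ===== SOURCE B (Python) =====
-- def count(height, bricks):
--     if bricks == 0: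
--         return 1
--     if bricks < height:
--         return 0
--     # bottom-up 0/1-knapsack over the parts height..bricks
--     dp = [0] * (bricks + 1)
--     dp[0] = 1
--     for p in range(height, bricks + 1):
--         dp = [dp[s] + (dp[s - p] if s >= p else 0) for s in range(bricks + 1)]
--     return dp[bricks]
-- ===== Notes on version B (the rewrite author's own statement) =====
-- stated objective: alternative
-- what changed: Replaced A's memoized top-down recursion (global dict cache keyed by strings) with an iterative bottom-up 0/1-knapsack table dp[0..bricks] built by one pass per part height..bricks.
-- outside the precondition, e.g. on count(-1, 1): A returns 4, B raises IndexError; on count(-2, -1): A returns 5, B raises IndexError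
import Mathlib
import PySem

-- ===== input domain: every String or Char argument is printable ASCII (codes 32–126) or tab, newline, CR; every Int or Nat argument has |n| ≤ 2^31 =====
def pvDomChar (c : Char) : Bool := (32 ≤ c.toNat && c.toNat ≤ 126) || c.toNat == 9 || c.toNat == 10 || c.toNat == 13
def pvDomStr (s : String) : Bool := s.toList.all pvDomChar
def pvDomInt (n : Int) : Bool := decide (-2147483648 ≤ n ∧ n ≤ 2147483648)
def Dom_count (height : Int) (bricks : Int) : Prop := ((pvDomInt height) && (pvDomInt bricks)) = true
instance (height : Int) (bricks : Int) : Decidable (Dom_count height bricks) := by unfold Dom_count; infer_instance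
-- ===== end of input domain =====

-- B replaces A's memoized top-down recursion by a bottom-up 0/1-knapsack table over the parts height..bricks (alternative decomposition; return value only — A's module-level cache never changes the returned value).

-- ===== PORT A =====
-- A's recursion with its memo cache threaded through explicitly.  Python keys the
-- cache by the string "#height#bricks$", an injective encoding of the pair
-- (height, bricks); the port keys the same cache by that pair directly, so the
-- lookups and stores coincide step for step.  A's `cache` is module-level and
-- survives across calls; starting each top-level call from the empty cache returns
-- the same value (memoization only reuses already computed pure values).
-- (`if _hlt :` only names the hypothesis for termination.)
def countMemo (height : Int) (bricks : Int) (cache : Std.HashMap (Int × Int) Int) :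
    Int × Std.HashMap (Int × Int) Int :=
  if bricks = 0 then (1, cache)
  else if _hlt : bricks < height then (0, cache)
  else
    match cache[(height, bricks)]? with
    | none =>
      let r1 := countMemo (height + 1) (bricks - height) cache
      let r2 := countMemo (height + 1) bricks r1.2
      let temp := r1.1 + r2.1
      (temp, r2.2.insert (height, bricks) temp)
    | some v => (v, cache)
termination_by ((1 - height).toNat, (bricks - height + 1).toNat)
decreasing_by
  all_goals
    by_cases hcase : height < 1
    · exact Prod.Lex.left _ _ (by omega)
    · have h2 : (1 - (height + 1)).toNat = (1 - height).toNat := by omega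
      rw [h2]
      exact Prod.Lex.right _ (by omega)

def count (height : Int) (bricks : Int) : Int :=
  (countMemo height bricks ∅).1

-- ===== PORT B =====
-- Literal port of Source B (the Python list is ported as Array Int).  Inside Pre_count
-- every index used below is in range and nonnegative (0 ≤ s ≤ bricks, and
-- 0 ≤ s - p when p ≤ s), so `.toNat` never clamps and the getD defaults and the
-- setIfInBounds bound are never exercised.
def count_alt (height : Int) (bricks : Int) : Int :=
  if bricks = 0 then 1
  else if bricks < height then 0
  else
    let dp0 := (Array.replicate (bricks + 1).toNat (0 : Int)).setIfInBounds 0 1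
    let dpF := (PySem.List.pyRange height (bricks + 1) 1).foldl
      (fun dp p => ((PySem.List.pyRange 0 (bricks + 1) 1).map
        (fun s => dp.getD s.toNat 0 +
          (if p ≤ s then dp.getD (s - p).toNat 0 else 0))).toArray) dp0
    dpF.getD bricks.toNat 0

-- ===== PRECONDITION & SPEC =====
-- Pre_ excludes exactly (a) negative heights reaching the else branch, outside the
-- natural staircase domain, where B's table indexing itself raises IndexError
-- while A recurses over phantom nonpositive part sizes, and (b) recursion depths
-- bricks - height ≥ 998, on which A raises RecursionError under CPython's default
-- recursion limit (A's call chain count(h+1,b) is about bricks - height frames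
-- deep; the boundary 997/998 is the measured raise point of A as shipped).
def Pre_count (height : Int) (bricks : Int) : Prop :=
  bricks = 0 ∨ bricks < height ∨ (0 ≤ height ∧ bricks - height ≤ 997)
instance (height : Int) (bricks : Int) : Decidable (Pre_count height bricks) := by
  unfold Pre_count; infer_instance
def pvWitness_count : Int × Int := (1, 5)
def Spec_count (height : Int) (bricks : Int) (out : Int) : Prop := out = count_alt height bricks
instance (height : Int) (bricks : Int) (out : Int) : Decidable (Spec_count height bricks out) := by unfold Spec_count; infer_instance

-- ===== CLAIM (what is proved, stated in full; the proofs are below) =====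
def Claim_equal_count : Prop := ∀ (height : Int) (bricks : Int), Dom_count height bricks → Pre_count height bricks → Spec_count height bricks (count height bricks)

-- ===== LEMMAS AND PROOFS =====

-- the cache-free value of A's recursion (proof-side specification of `count`)
def countP (height : Int) (bricks : Int) : Int :=
  if bricks = 0 then 1
  else if _hlt : bricks < height then 0
  else countP (height + 1) (bricks - height) + countP (height + 1) bricks
termination_by ((1 - height).toNat, (bricks - height + 1).toNat)
decreasing_by
  all_goals
    by_cases hcase : height < 1
    · exact Prod.Lex.left _ _ (by omega)
    · have h2 : (1 - (height + 1)).toNat = (1 - height).toNat := by omega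
      rw [h2]
      exact Prod.Lex.right _ (by omega)

theorem countP_base0 (h b : Int) (hb : b = 0) : countP h b = 1 := by
  rw [countP]; simp [hb]

theorem countP_baselt (h b : Int) (hb : ¬ b = 0) (hlt : b < h) : countP h b = 0 := by
  rw [countP]; simp [hb, hlt]

theorem countP_rec (h b : Int) (hb : ¬ b = 0) (hlt : ¬ b < h) :
    countP h b = countP (h + 1) (b - h) + countP (h + 1) b := by
  rw [countP]; simp [hb, hlt]

-- every value stored in the cache is the cache-free value of its key
def MemoInv (m : Std.HashMap (Int × Int) Int) : Prop :=
  ∀ (p : Int × Int) (v : Int), m[p]? = some v → v = countP p.1 p.2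

theorem countMemo_correct (height bricks : Int) (cache : Std.HashMap (Int × Int) Int)
    (hc : MemoInv cache) :
    (countMemo height bricks cache).1 = countP height bricks ∧
      MemoInv (countMemo height bricks cache).2 := by
  induction height, bricks, cache using countMemo.induct with
  | case1 height cache =>
    rw [countMemo]
    exact ⟨(countP_base0 height 0 rfl).symm, hc⟩
  | case2 height bricks cache hb hlt =>
    rw [countMemo]
    simp only [if_neg hb, dif_pos hlt]
    exact ⟨(countP_baselt _ _ hb hlt).symm, hc⟩
  | case3 height bricks cache hb hlt hnone r1 ih1 ih2 =>
    rw [countMemo]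
    simp only [if_neg hb, dif_neg hlt, hnone]
    obtain ⟨e1, i1⟩ := ih1 hc
    obtain ⟨e2, i2⟩ := ih2 i1
    have e2' : (countMemo (height + 1) bricks
        (countMemo (height + 1) (bricks - height) cache).2).1 = countP (height + 1) bricks := e2
    have i2' : MemoInv (countMemo (height + 1) bricks
        (countMemo (height + 1) (bricks - height) cache).2).2 := i2
    constructor
    · rw [e1, e2']
      exact (countP_rec height bricks hb hlt).symm
    · intro p v hp
      rw [Std.HashMap.getElem?_insert] at hp
      by_cases hk : (height, bricks) = p
      · subst hk
        rw [if_pos (by simp)] at hp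
        have hv : v = (countMemo (height + 1) (bricks - height) cache).1 +
            (countMemo (height + 1) bricks
              (countMemo (height + 1) (bricks - height) cache).2).1 := by
          simpa using hp.symm
        rw [hv, e1, e2']
        exact (countP_rec height bricks hb hlt).symm
      · rw [if_neg (by simpa using hk)] at hp
        exact i2' p v hp
  | case4 height bricks cache hb hlt v hv =>
    rw [countMemo]
    simp only [if_neg hb, dif_neg hlt, hv]
    exact ⟨hc _ _ hv, hc⟩

theorem count_eq_countP (h b : Int) : count h b = countP h b := by
  have := countMemo_correct h b ∅ (by unfold MemoInv; intro p v hp; simp at hp)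
  simpa [count] using this.1

-- W lo P s = number of ways to write s as a sum of distinct parts from {lo..P}.
def W (lo P s : Int) : Int :=
  if _h : P < lo then (if s = 0 then 1 else 0)
  else W lo (P - 1) s + W lo (P - 1) (s - P)
termination_by (P - lo + 1).toNat
decreasing_by all_goals omega

theorem W_base (lo P s : Int) (h : P < lo) : W lo P s = if s = 0 then 1 else 0 := by
  rw [W]; simp [h]

theorem W_rec (lo P s : Int) (h : ¬ P < lo) :
    W lo P s = W lo (P - 1) s + W lo (P - 1) (s - P) := by
  rw [W]; simp [h]

theorem W_neg (k : Nat) (lo P s : Int) (hk : (P - lo + 1).toNat ≤ k)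
    (hlo : 0 ≤ lo) (hs : s < 0) : W lo P s = 0 := by
  induction k generalizing P s with
  | zero => rw [W_base _ _ _ (by omega), if_neg (by omega : ¬ s = 0)]
  | succ k ih =>
    by_cases h : P < lo
    · rw [W_base _ _ _ h, if_neg (by omega : ¬ s = 0)]
    · rw [W_rec _ _ _ h, ih _ _ (by omega) hs, ih _ _ (by omega) (by omega)]
      norm_num

theorem W_zero (k : Nat) (lo P : Int) (hk : (P - lo + 1).toNat ≤ k)
    (hlo : 1 ≤ lo) : W lo P 0 = 1 := by
  induction k generalizing P with
  | zero => rw [W_base _ _ _ (by omega), if_pos rfl]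
  | succ k ih =>
    by_cases h : P < lo
    · rw [W_base _ _ _ h, if_pos rfl]
    · rw [W_rec _ _ _ h, ih _ (by omega),
        W_neg ((P - 1 - lo + 1).toNat) lo _ _ le_rfl (by omega) (by omega)]
      norm_num

theorem W_small (k : Nat) (lo P s : Int) (hk : (P - lo + 1).toNat ≤ k)
    (h0 : 0 < s) (hs : s < lo) : W lo P s = 0 := by
  induction k generalizing P with
  | zero => rw [W_base _ _ _ (by omega), if_neg (by omega : ¬ s = 0)]
  | succ k ih =>
    by_cases h : P < lo
    · rw [W_base _ _ _ h, if_neg (by omega : ¬ s = 0)]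
    · rw [W_rec _ _ _ h, ih _ (by omega),
        W_neg ((P - 1 - lo + 1).toNat) lo _ _ le_rfl (by omega) (by omega)]
      norm_num

-- split off the SMALLEST part instead of the largest
theorem W_split (k : Nat) (lo hi s : Int) (hk : (hi - lo).toNat ≤ k) (h : lo ≤ hi) :
    W lo hi s = W (lo + 1) hi s + W (lo + 1) hi (s - lo) := by
  induction k generalizing hi s with
  | zero =>
    rw [W_rec _ _ _ (by omega), W_base lo (hi - 1) s (by omega),
      W_base lo (hi - 1) (s - hi) (by omega), W_base (lo + 1) hi s (by omega),
      W_base (lo + 1) hi (s - lo) (by omega)]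
    have hE : hi = lo := by omega
    rw [hE]
  | succ k ih =>
    by_cases hE : hi = lo
    · rw [W_rec _ _ _ (by omega), W_base lo (hi - 1) s (by omega),
        W_base lo (hi - 1) (s - hi) (by omega), W_base (lo + 1) hi s (by omega),
        W_base (lo + 1) hi (s - lo) (by omega), hE]
    · rw [W_rec lo hi s (by omega),
        ih (hi - 1) s (by omega) (by omega), ih (hi - 1) (s - hi) (by omega) (by omega),
        W_rec (lo + 1) hi s (by omega), W_rec (lo + 1) hi (s - lo) (by omega)]
      have e1 : s - lo - hi = s - hi - lo := by ring
      rw [e1]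
      ring

-- A's recursion computes W: parts above bricks are never usable
theorem countP_eq_W (k : Nat) (h b hi : Int) (hk : (b - h).toNat ≤ k)
    (hh : 0 ≤ h) (hb : 1 ≤ b) (hhi : b ≤ hi) : countP h b = W h hi b := by
  induction k generalizing h b with
  | zero =>
    by_cases hlt : b < h
    · rw [countP_baselt _ _ (by omega) hlt,
        W_small ((hi - h + 1).toNat) _ _ _ le_rfl (by omega) hlt]
    · have hbh : b = h := by omega
      rw [countP_rec _ _ (by omega) hlt,
        countP_base0 (h + 1) (b - h) (by omega),
        countP_baselt (h + 1) b (by omega) (by omega),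
        W_split ((hi - h).toNat) h hi b le_rfl (by omega),
        W_small ((hi - (h + 1) + 1).toNat) (h + 1) hi b le_rfl (by omega) (by omega),
        show b - h = (0:Int) by omega,
        W_zero ((hi - (h + 1) + 1).toNat) (h + 1) hi le_rfl (by omega)]
      norm_num
  | succ k ih =>
    by_cases hlt : b < h
    · rw [countP_baselt _ _ (by omega) hlt,
        W_small ((hi - h + 1).toNat) _ _ _ le_rfl (by omega) hlt]
    · rw [countP_rec _ _ (by omega) hlt,
        W_split ((hi - h).toNat) h hi b le_rfl (by omega)]
      have hterm2 : countP (h + 1) b = W (h + 1) hi b := by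
        by_cases hb2 : b < h + 1
        · rw [countP_baselt _ _ (by omega) hb2,
            W_small ((hi - (h + 1) + 1).toNat) _ _ _ le_rfl (by omega) hb2]
        · exact ih (h + 1) b (by omega) (by omega) hb (by omega)
      have hterm1 : countP (h + 1) (b - h) = W (h + 1) hi (b - h) := by
        by_cases hz : b - h = 0
        · rw [countP_base0 _ _ hz, hz,
            W_zero ((hi - (h + 1) + 1).toNat) (h + 1) hi le_rfl (by omega)]
        · by_cases hb2 : b - h < h + 1
          · rw [countP_baselt _ _ hz hb2,
              W_small ((hi - (h + 1) + 1).toNat) _ _ _ le_rfl (by omega) hb2]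
          · exact ih (h + 1) (b - h) (by omega) (by omega) (by omega) (by omega)
      rw [hterm1, hterm2]
      ring

-- Array.getD through toList
theorem arr_getD (a : Array Int) (i : Nat) (d : Int) : a.getD i d = a.toList.getD i d := by
  by_cases h : i < a.size
  · simp [Array.getD, List.getD, h]
  · have h2 : a.toList.length ≤ i := by simpa using Nat.le_of_not_lt h
    simp [Array.getD, List.getD, h]

-- reading a comprehension over range(n) at s
theorem getD_map_pyRange (f : Int → Int) (n s : Int) (h0 : 0 ≤ s) (h1 : s < n) :
    ((PySem.List.pyRange 0 n 1).map f).getD s.toNat 0 = f s := by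
  have hlen : s.toNat < ((PySem.List.pyRange 0 n 1).map f).length := by
    simp [PySem.List.length_pyRange_one]
    omega
  rw [List.getD_eq_getElem _ _ hlen, List.getElem_map, PySem.List.getElem_pyRange_one]
  congr 1
  omega

-- the initial table [1, 0, …, 0] is the W-table for the empty set of parts
theorem dp0_eq (h n : Int) :
    (List.replicate (n + 1).toNat (0 : Int)).set 0 1 =
      (PySem.List.pyRange 0 (n + 1) 1).map (fun s => W h (h - 1) s) := by
  apply List.ext_getElem
  · simp only [List.length_set, List.length_replicate, PySem.List.length_pyRange_one,
      List.length_map]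
    omega
  · intro i h1 h2
    have hm : i < (n + 1).toNat := by simpa using h1
    rw [List.getElem_map, PySem.List.getElem_pyRange_one,
      W_base _ _ _ (by omega : h - 1 < h), List.getElem_set]
    simp only [List.getElem_replicate]
    by_cases hi : i = 0
    · rw [if_pos (by omega), if_pos (by simp [hi])]
    · rw [if_neg (by omega), if_neg (by omega)]

-- one DP pass over part p = one peel of the largest part in W
theorem dp_pass (h n P : Int) (hh : 0 ≤ h) (hP : h - 1 ≤ P) :
    ((PySem.List.pyRange 0 (n + 1) 1).map
      (fun s => ((PySem.List.pyRange 0 (n + 1) 1).map (fun t => W h P t)).getD s.toNat 0 +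
        (if P + 1 ≤ s then
          ((PySem.List.pyRange 0 (n + 1) 1).map (fun t => W h P t)).getD (s - (P + 1)).toNat 0
         else 0))) =
    (PySem.List.pyRange 0 (n + 1) 1).map (fun s => W h (P + 1) s) := by
  apply List.map_congr_left
  intro s hs
  rw [PySem.List.mem_pyRange_one] at hs
  rw [getD_map_pyRange _ _ _ hs.1 hs.2, W_rec h (P + 1) s (by omega)]
  have hstep : P + 1 - 1 = P := by omega
  rw [hstep]
  by_cases hps : P + 1 ≤ s
  · rw [if_pos hps, getD_map_pyRange _ _ _ (by omega) (by omega)]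
  · rw [if_neg hps,
      W_neg ((P - h + 1).toNat) h P (s - (P + 1)) le_rfl hh (by omega)]

-- the whole fold builds the W-table for parts h..P
theorem dp_fold (h n : Int) (hh : 0 ≤ h) :
    ∀ (k : Nat) (P : Int), (P - (h - 1)).toNat ≤ k → h - 1 ≤ P → P ≤ n →
    ((PySem.List.pyRange h (P + 1) 1).foldl
      (fun dp p => ((PySem.List.pyRange 0 (n + 1) 1).map
        (fun s => dp.getD s.toNat 0 +
          (if p ≤ s then dp.getD (s - p).toNat 0 else 0))).toArray)
      ((Array.replicate (n + 1).toNat (0 : Int)).setIfInBounds 0 1)).toList =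
    (PySem.List.pyRange 0 (n + 1) 1).map (fun s => W h P s) := by
  intro k
  induction k with
  | zero =>
    intro P hk h1 h2
    have hP : P = h - 1 := by omega
    subst hP
    rw [PySem.List.pyRange_one_eq_nil (a := h) (b := h - 1 + 1) (by omega)]
    simpa [Array.toList_setIfInBounds] using dp0_eq h n
  | succ k ih =>
    intro P hk h1 h2
    by_cases hP : P = h - 1
    · subst hP
      rw [PySem.List.pyRange_one_eq_nil (a := h) (b := h - 1 + 1) (by omega)]
      simpa [Array.toList_setIfInBounds] using dp0_eq h n
    · have e1 : PySem.List.pyRange h (P + 1) 1 = PySem.List.pyRange h P 1 ++ [P] :=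
        PySem.List.pyRange_one_succ_right (a := h) (b := P) (by omega)
      have e2 : PySem.List.pyRange h P 1 = PySem.List.pyRange h (P - 1 + 1) 1 := by
        norm_num
      rw [e1, List.foldl_append]
      simp only [List.foldl_cons, List.foldl_nil, List.toList_toArray]
      have ihl := ih (P - 1) (by omega) (by omega) (by omega)
      rw [e2]
      have harr : ∀ (i : Nat) (d : Int),
          ((PySem.List.pyRange h (P - 1 + 1) 1).foldl
            (fun dp p => ((PySem.List.pyRange 0 (n + 1) 1).map
              (fun s => dp.getD s.toNat 0 +
                (if p ≤ s then dp.getD (s - p).toNat 0 else 0))).toArray)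
            ((Array.replicate (n + 1).toNat (0 : Int)).setIfInBounds 0 1)).getD i d =
          ((PySem.List.pyRange 0 (n + 1) 1).map (fun s => W h (P - 1) s)).getD i d := by
        intro i d
        rw [arr_getD, ihl]
      simp only [harr]
      have hp := dp_pass h n (P - 1) hh (by omega)
      have hP1 : P - 1 + 1 = P := by omega
      rw [hP1] at hp
      exact hp

-- ===== VERDICT (by name: the statement is the Claim_ definition above) =====
theorem count_spec : Claim_equal_count := by
  intro h b _ pre
  unfold Spec_count count_alt
  rw [count_eq_countP]
  by_cases hb0 : b = 0
  · rw [countP_base0 _ _ hb0, if_pos hb0]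
  · by_cases hlt : b < h
    · rw [countP_baselt _ _ hb0 hlt, if_neg hb0, if_pos hlt]
    · have hh : 0 ≤ h := by
        rcases pre with h1 | h1 | ⟨h1, h2⟩ <;> omega
      have hb1 : 1 ≤ b := by omega
      rw [if_neg hb0, if_neg hlt]
      show countP h b =
        ((PySem.List.pyRange h (b + 1) 1).foldl
          (fun dp p => ((PySem.List.pyRange 0 (b + 1) 1).map
            (fun s => dp.getD s.toNat 0 +
              (if p ≤ s then dp.getD (s - p).toNat 0 else 0))).toArray)
          ((Array.replicate (b + 1).toNat (0 : Int)).setIfInBounds 0 1)).getD b.toNat 0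
      rw [arr_getD, dp_fold h b hh (b - (h - 1)).toNat b le_rfl (by omega) le_rfl,
        getD_map_pyRange _ _ _ (by omega) (by omega)]
      exact countP_eq_W (b - h).toNat h b b le_rfl hh hb1 le_rfl
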